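-- pv_equiv track=rewrite | github.com/nikhilniksss/Data-Structure-Algorithm | 35 - Problems/detect_capital.py | detectCapital
-- ===== SOURCE A (Python) =====
-- def detectCapital(word):
--     count = 0
--     length = len(word)
--
--     for i in range(length):
--         if word[i] >= chr(65) and word[i] < chr(91):
--             count += 1
--
--     if count == length:
--         return True
--     elif count == 0:
--         return True
--     elif count == 1 and word[0] >= chr(65) and word[0] < chr(91):
--         return True
--     else:
--         return False
-- ===== SOURCE B (Python) =====
-- def detectCapital(word):
--     # True iff all chars are ASCII capitals, or no char after the first is.
--     cap = lambda c: c >= chr(65) and c < chr(91)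
--     return all(cap(c) for c in word) or all(not cap(c) for c in word[1:])
-- ===== Notes on version B (the rewrite author's own statement) =====
-- stated objective: simpler
-- what changed: Replaces the counter-plus-four-branch analysis with two short-circuiting all() scans: all-capitals, or no capital after index 0 (covering lowercase and title case at once).
import Mathlib
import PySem

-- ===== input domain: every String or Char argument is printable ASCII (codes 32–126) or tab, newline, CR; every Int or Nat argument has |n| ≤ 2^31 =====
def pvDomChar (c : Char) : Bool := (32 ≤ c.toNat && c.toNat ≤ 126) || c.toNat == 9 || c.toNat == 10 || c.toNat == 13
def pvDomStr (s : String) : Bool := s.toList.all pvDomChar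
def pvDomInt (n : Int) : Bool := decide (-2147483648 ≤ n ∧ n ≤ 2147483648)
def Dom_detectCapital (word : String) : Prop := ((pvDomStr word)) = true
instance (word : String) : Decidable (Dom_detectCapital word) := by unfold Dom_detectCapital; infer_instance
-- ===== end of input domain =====

-- B replaces A's capital counter and four-way branch with two all-scans; same return value, no side effects.
-- ===== PORT A =====
def pvCap (c : Char) : Bool := decide ((Char.ofNat 65) ≤ c) && decide (c < (Char.ofNat 91))

def detectCapital (word : String) : Bool :=
  let cs := word.toList
  let length := cs.length
  let count := cs.foldl (fun acc c => if pvCap c then acc + 1 else acc) 0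
  if count = length then true
  else if count = 0 then true
  else if count = 1 && (cs.head?.elim false pvCap) then true
  else false

-- ===== PORT B =====
def detectCapital_alt (word : String) : Bool :=
  let cs := word.toList
  cs.all pvCap || (cs.drop 1).all (fun c => !pvCap c)

-- ===== PRECONDITION & SPEC =====
def Spec_detectCapital (word : String) (out : Bool) : Prop := out = detectCapital_alt word
instance (word : String) (out : Bool) : Decidable (Spec_detectCapital word out) := by unfold Spec_detectCapital; infer_instance

-- ===== CLAIM (what is proved, stated in full; the proofs are below) =====
def Claim_equal_detectCapital : Prop := ∀ (word : String), Dom_detectCapital word → Spec_detectCapital word (detectCapital word)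

-- ===== LEMMAS AND PROOFS =====

-- ===== VERDICT (by name: the statement is the Claim_ definition above) =====
lemma pvCount_eq (cs : List Char) (n : Nat) :
    cs.foldl (fun acc c => if pvCap c then acc + 1 else acc) n = n + cs.countP pvCap := by
  induction cs generalizing n with
  | nil => simp
  | cons c t ih => simp [List.countP_cons, ih]; split_ifs <;> omega

lemma pvMain (word : String) : detectCapital word = detectCapital_alt word := by
  simp only [detectCapital, detectCapital_alt, List.drop_one]
  generalize word.toList = cs
  cases cs with
  | nil => simp
  | cons c t =>
    have hle := List.countP_le_length (p := pvCap) (l := t)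
    have htz : (t.all (fun c => !pvCap c)) = decide (t.countP pvCap = 0) := by
      rw [Bool.eq_iff_iff]; simp [List.countP_eq_zero]
    have hall : (t.all pvCap) = decide (t.countP pvCap = t.length) := by
      rw [Bool.eq_iff_iff]; simp [List.countP_eq_length]
    simp only [pvCount_eq, List.countP_cons, List.length_cons, List.head?_cons,
      Option.elim_some, List.tail_cons, List.all_cons, Nat.zero_add, htz, hall]
    by_cases hc : pvCap c <;> by_cases h0 : t.countP pvCap = t.length <;>
      simp [hc, h0] <;> omega

theorem detectCapital_spec : Claim_equal_detectCapital := by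
  intro word _
  unfold Spec_detectCapital
  exact pvMain word
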